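-- pv_equiv track=rewrite | github.com/Shashwat25011998/SubstringPy | code.py | distchar
-- ===== SOURCE A (Python) =====
-- nchars = 256
--
-- def distchar(str, n):
-- 	count = [0] * nchars
-- 	for i in range(n):
-- 		count[ord(str[i])] += 1
--
-- 	max_dist = 0
-- 	for i in range(nchars):
-- 		if (count[i] != 0):
-- 			max_dist += 1
--
-- 	return max_dist
-- ===== SOURCE B (Python) =====
-- def distchar(str, n):
--     chars = sorted(str[i] for i in range(n))
--     if not chars:
--         return 0
--     return 1 + sum(a != b for a, b in zip(chars, chars[1:]))
-- ===== Notes on version B (the rewrite author's own statement) =====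
-- stated objective: alternative
-- what changed: Replaces the 256-bucket count array and the second 256-iteration bucket scan with sort-then-scan: sort the first n characters and return 1 + the number of adjacent unequal pairs (0 for empty).
import Mathlib
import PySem

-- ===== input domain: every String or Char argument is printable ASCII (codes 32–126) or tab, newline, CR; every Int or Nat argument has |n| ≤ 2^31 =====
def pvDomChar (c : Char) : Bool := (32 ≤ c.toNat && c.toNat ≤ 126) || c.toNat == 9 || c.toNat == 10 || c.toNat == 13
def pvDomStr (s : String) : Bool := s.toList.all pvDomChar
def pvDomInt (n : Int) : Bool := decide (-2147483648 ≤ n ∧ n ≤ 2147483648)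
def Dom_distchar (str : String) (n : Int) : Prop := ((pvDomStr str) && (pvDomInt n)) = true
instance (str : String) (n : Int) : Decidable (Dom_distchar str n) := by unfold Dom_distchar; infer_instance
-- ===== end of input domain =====

-- B sorts the first n characters and counts boundaries between adjacent unequal
-- characters (sort-then-scan) instead of A's 256-bucket count array plus bucket scan
-- (objective: alternative).


-- ===== PORT A =====
-- count = [0]*256; for i in range(n): count[ord(str[i])] += 1; then count the nonzero buckets.
def distchar (str : String) (n : Int) : Int :=
  let count : List Int :=
    (PySem.List.pyRange 0 n 1).foldl
      (fun c i =>
        match PySem.Str.pyGet? str i with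
        | some ch =>
            PySem.List.pySetD c (ch.toNat : Int)
              (PySem.List.pyGetD c (ch.toNat : Int) 0 + 1)
        | none => c)  -- IndexError (excluded by Pre_)
      (List.replicate 256 (0 : Int))
  (PySem.List.pyRange 0 256 1).foldl
    (fun max_dist i =>
      if PySem.List.pyGetD count i 0 ≠ 0 then max_dist + 1 else max_dist)
    0

-- ===== PORT B =====
-- chars = sorted(str[i] for i in range(n)); if not chars: return 0;
-- return 1 + sum(a != b for a, b in zip(chars, chars[1:]))
def distchar_alt (str : String) (n : Int) : Int :=
  let chars : List Char :=
    PySem.List.sorted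
      ((PySem.List.pyRange 0 n 1).foldl
        (fun acc i =>
          match PySem.Str.pyGet? str i with
          | some ch => acc ++ [ch]
          | none => acc) [])  -- IndexError (excluded by Pre_)
      (fun c => c) false
  if chars = [] then 0
  else 1 + ((chars.zip chars.tail).map (fun p => if p.1 ≠ p.2 then (1 : Int) else 0)).sum

-- ===== PRECONDITION & SPEC =====
-- Pre_ excludes exactly n > len(str), on which both Pythons raise IndexError (str[i] out of range).
def Pre_distchar (str : String) (n : Int) : Prop := n ≤ (str.toList.length : Int)
instance (str : String) (n : Int) : Decidable (Pre_distchar str n) := by unfold Pre_distchar; infer_instance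
def pvWitness_distchar : String × Int := ("abca", 3)

def Spec_distchar (str : String) (n : Int) (out : Int) : Prop := out = distchar_alt str n
instance (str : String) (n : Int) (out : Int) : Decidable (Spec_distchar str n out) := by unfold Spec_distchar; infer_instance

-- ===== CLAIM (what is proved, stated in full; the proofs are below) =====
def Claim_equal_distchar : Prop := ∀ (str : String) (n : Int), Dom_distchar str n → Pre_distchar str n → Spec_distchar str n (distchar str n)

-- ===== LEMMAS AND PROOFS =====

-- A loop 'for i in range(n): … str[i] …' with n ≤ len is a fold over the first n characters.
theorem foldl_range_getD_take {β : Type} (xs : List Char) (n : Int) (hn : n ≤ (xs.length : Int))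
    (f : β → Char → β) (init : β) :
    (PySem.List.pyRange 0 n 1).foldl
        (fun acc i =>
          match PySem.List.pyGet? xs i with
          | some ch => f acc ch
          | none => acc) init
      = (xs.take n.toNat).foldl f init := by
  by_cases h : n ≤ 0
  · rw [PySem.List.pyRange_one_eq_nil h]
    have : n.toNat = 0 := Int.toNat_of_nonpos h
    simp [this]
  · rw [not_le] at h
    have hm : n = (n.toNat : Int) := (Int.toNat_of_nonneg h.le).symm
    have hlen : (xs.take n.toNat).length = n.toNat := by
      rw [List.length_take]
      omega
    have := PySem.List.foldl_pyRange_zero_pyGetD' (xs.take n.toNat) 'a' f init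
    rw [hlen] at this
    rw [hm]
    simp only [Int.toNat_natCast]
    rw [← this]
    apply PySem.List.foldl_congr_mem'
    intro i hi acc
    have hib := PySem.List.mem_pyRange_one.mp hi
    have h1 : i < (xs.length : Int) := by omega
    have h2 : i < ((xs.take n.toNat).length : Int) := by rw [hlen]; omega
    rw [PySem.List.pyGet?_eq_some_getElem xs hib.1 h1,
        PySem.List.pyGetD_eq_getElem (xs.take n.toNat) 'a' hib.1 h2,
        List.getElem_take]

-- the bucket array after A's first loop: bucket i holds the number of chars with code i
theorem bump_fold_getD (cs : List Char) (c0 : List Int) (hc : c0.length = 256)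
    (h256 : ∀ ch ∈ cs, ch.toNat < 256) (i : Nat) (hi : i < 256) :
    (cs.foldl
        (fun c ch =>
          PySem.List.pySetD c (ch.toNat : Int)
            (PySem.List.pyGetD c (ch.toNat : Int) 0 + 1)) c0).getD i 0
      = c0.getD i 0 + (cs.countP (fun ch => ch.toNat == i) : Int) := by
  induction cs generalizing c0 with
  | nil => simp
  | cons ch cs ih =>
    have hch : ch.toNat < 256 := h256 ch (by simp)
    have hset : (PySem.List.pySetD c0 (ch.toNat : Int)
        (PySem.List.pyGetD c0 (ch.toNat : Int) 0 + 1)).length = 256 := by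
      rw [PySem.List.length_pySetD, hc]
    rw [List.foldl_cons, ih _ hset (fun x hx => h256 x (by simp [hx]))]
    rw [PySem.List.pySetD_natCast, PySem.List.pyGetD_natCast]
    by_cases he : ch.toNat = i
    · subst he
      simp [List.getD_eq_getElem?_getD, hc, hi]
      omega
    · simp [List.getD_eq_getElem?_getD, he]

theorem length_bump_fold (cs : List Char) (c0 : List Int) :
    (cs.foldl
        (fun c ch =>
          PySem.List.pySetD c (ch.toNat : Int)
            (PySem.List.pyGetD c (ch.toNat : Int) 0 + 1)) c0).length = c0.length := by
  induction cs generalizing c0 with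
  | nil => rfl
  | cons ch cs ih => rw [List.foldl_cons, ih, PySem.List.length_pySetD]

-- 'if count[i] != 0: max_dist += 1' over a list of indices is countP
theorem foldl_count_if_prop {α : Type} (p : α → Prop) [DecidablePred p] (l : List α) (a : Int) :
    l.foldl (fun acc x => if p x then acc + 1 else acc) a
      = a + (l.countP (fun x => decide (p x)) : Int) := by
  induction l generalizing a with
  | nil => simp
  | cons x l ih =>
    rw [List.foldl_cons, ih, List.countP_cons]
    by_cases hp : p x
    · simp [hp]; ring
    · simp [hp]

theorem chars_pyGet?_eq : @PySem.Chars.pyGet? = @PySem.List.pyGet? (α := Char) := by rfl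

theorem char_toNat_injective : Function.Injective Char.toNat :=
  fun _ _ h => Char.ext (UInt32.toNat_inj.mp h)

-- counting the codes 0..255 that occur among cs equals the number of distinct chars of cs
theorem countP_range_eq_dedup_length (cs : List Char) (h256 : ∀ ch ∈ cs, ch.toNat < 256) :
    (List.range 256).countP (fun k => decide (k ∈ cs.map Char.toNat))
      = cs.dedup.length := by
  rw [List.countP_eq_length_filter]
  have hperm : ((List.range 256).filter (fun k => decide (k ∈ cs.map Char.toNat))).Perm
      (cs.dedup.map Char.toNat) := by
    rw [List.perm_ext_iff_of_nodup
        ((List.nodup_range).filter _)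
        (List.Nodup.map char_toNat_injective cs.nodup_dedup)]
    intro a
    simp only [List.mem_filter, List.mem_range, List.mem_map, decide_eq_true_eq,
      List.mem_dedup]
    constructor
    · rintro ⟨-, ch, hch, rfl⟩; exact ⟨ch, hch, rfl⟩
    · rintro ⟨ch, hch, rfl⟩; exact ⟨h256 ch hch, ch, hch, rfl⟩
  rw [hperm.length_eq, List.length_map]

-- on a ≤-sorted nonempty list, 1 + (number of adjacent unequal pairs) = number of distinct elements
theorem adjdiff_sorted : ∀ (l : List Char), l.Pairwise (· ≤ ·) → l ≠ [] →
    (l.zip l.tail).countP (fun p => decide (p.1 ≠ p.2)) + 1 = l.dedup.length := by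
  intro l
  induction l with
  | nil => intro _ h; exact absurd rfl h
  | cons a t ih =>
    intro hp _
    have hpt : t.Pairwise (· ≤ ·) := hp.tail
    have hat : ∀ x ∈ t, a ≤ x := fun x hx => (List.pairwise_cons.mp hp).1 x hx
    cases t with
    | nil => simp
    | cons b u =>
      have hrec := ih hpt (by simp)
      by_cases hab : a = b
      · subst hab
        have hmem : a ∈ a :: u := by simp
        rw [List.dedup_cons_of_mem hmem]
        simpa [List.zip_cons_cons, List.countP_cons] using hrec
      · have hnm : a ∉ b :: u := by
          intro hmem
          rcases List.mem_cons.mp hmem with h | h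
          · exact hab h
          · have h1 : a ≤ b := hat b (by simp)
            have h2 : b ≤ a := (List.pairwise_cons.mp hpt).1 a h
            exact hab (le_antisymm h1 h2)
        rw [List.dedup_cons_of_notMem hnm]
        simp only [List.length_cons, ← hrec, List.zip_cons_cons]
        simp [hab]

-- ===== VERDICT (by name: the statement is the Claim_ definition above) =====
theorem distchar_spec : Claim_equal_distchar := by
  intro str n hdom hpre
  unfold Spec_distchar distchar distchar_alt
  have hpre' : n ≤ (str.toList.length : Int) := hpre
  -- both first loops become folds over cs, the first n characters
  have hA := foldl_range_getD_take str.toList n hpre'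
      (fun c ch =>
        PySem.List.pySetD c (ch.toNat : Int)
          (PySem.List.pyGetD c (ch.toNat : Int) 0 + 1))
      (List.replicate 256 (0 : Int))
  have hB := foldl_range_getD_take str.toList n hpre'
      (fun acc ch => acc ++ [ch]) ([] : List Char)
  simp only [PySem.Str.pyGet?, chars_pyGet?_eq]
  simp only [hA, hB]
  set cs := str.toList.take n.toNat with hcs
  have h256 : ∀ ch ∈ cs, ch.toNat < 256 := by
    intro ch hch
    have hmem : ch ∈ str.toList := List.mem_of_mem_take hch
    have hdc : pvDomChar ch = true := by
      have hs : pvDomStr str = true := by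
        have h := hdom; unfold Dom_distchar at h
        simp only [Bool.and_eq_true] at h
        exact h.1
      exact List.all_eq_true.mp hs ch hmem
    unfold pvDomChar at hdc
    simp only [Bool.or_eq_true, Bool.and_eq_true, decide_eq_true_eq, beq_iff_eq] at hdc
    omega
  -- B's collected list is cs itself, and B counts distinct via the sorted rearrangement
  rw [PySem.List.foldl_append_singleton cs [], List.nil_append]
  set s := PySem.List.sorted cs (fun c => c) false with hsdef
  have hperm : s.Perm cs := PySem.List.sorted_perm cs _ _
  have hBval : (if s = [] then (0 : Int)
      else 1 + ((s.zip s.tail).map (fun p => if p.1 ≠ p.2 then (1 : Int) else 0)).sum)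
      = (cs.dedup.length : Int) := by
    by_cases hnil : s = []
    · have hcs0 : cs = [] := by
        rw [hnil] at hperm
        exact hperm.symm.eq_nil
      simp [hnil, hcs0]
    · have hsp : s.Pairwise (· ≤ ·) := PySem.List.sorted_pairwise cs _
      have hadj := adjdiff_sorted s hsp hnil
      have hdl : s.dedup.length = cs.dedup.length := hperm.dedup.length_eq
      have hsum : ((s.zip s.tail).map (fun p => if p.1 ≠ p.2 then (1 : Int) else 0)).sum
          = ((s.zip s.tail).countP (fun p => decide (p.1 ≠ p.2)) : Int) := by
        simpa using PySem.List.sum_map_ite_one_zero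
          (fun p : Char × Char => decide (p.1 ≠ p.2)) (s.zip s.tail)
      rw [if_neg hnil, hsum, ← hdl, ← hadj]
      push_cast
      ring
  rw [hBval]
  -- A's second loop counts nonzero buckets
  set count := cs.foldl
      (fun c ch =>
        PySem.List.pySetD c (ch.toNat : Int)
          (PySem.List.pyGetD c (ch.toNat : Int) 0 + 1))
      (List.replicate 256 (0 : Int)) with hcount
  have hclen : count.length = 256 := by
    rw [hcount, length_bump_fold, List.length_replicate]
  have hrange : (PySem.List.pyRange 0 256 1) = (List.range 256).map (fun k : Nat => (k : Int)) := by
    rw [show (256 : Int) = ((256 : Nat) : Int) from rfl, PySem.List.pyRange_zero_nat]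
  rw [foldl_count_if_prop (fun i : Int => PySem.List.pyGetD count i 0 ≠ 0), Int.zero_add,
    hrange, List.countP_map]
  have hcong : (List.range 256).countP
        ((fun i : Int => decide (PySem.List.pyGetD count i 0 ≠ 0)) ∘ (fun k : Nat => (k : Int)))
      = (List.range 256).countP (fun k => decide (k ∈ cs.map Char.toNat)) := by
    apply List.countP_congr
    intro k hk
    have hk' : k < 256 := List.mem_range.mp hk
    simp only [Function.comp_apply]
    rw [PySem.List.pyGetD_natCast]
    have hbump := bump_fold_getD cs (List.replicate 256 (0 : Int)) (by rw [List.length_replicate]) h256 k hk'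
    rw [← hcount] at hbump
    rw [hbump]
    have hrep : (List.replicate 256 (0 : Int)).getD k 0 = 0 := by
      rw [List.getD_eq_getElem?_getD, List.getElem?_replicate]
      simp [hk']
    rw [hrep, zero_add]
    simp only [decide_eq_true_eq]
    rw [List.countP_eq_length_filter]
    constructor
    · intro hne
      have hnil : cs.filter (fun ch => ch.toNat == k) ≠ [] := by
        intro h0; rw [h0] at hne; exact hne (by norm_num)
      obtain ⟨ch, hch⟩ := List.exists_mem_of_ne_nil _ hnil
      obtain ⟨h1, h2⟩ := List.mem_filter.mp hch
      exact List.mem_map.mpr ⟨ch, h1, by simpa using h2⟩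
    · intro hmem
      obtain ⟨ch, hch, rfl⟩ := List.mem_map.mp hmem
      have hmemf : ch ∈ cs.filter (fun c => c.toNat == ch.toNat) :=
        List.mem_filter.mpr ⟨hch, by simp⟩
      have hpos : 0 < (cs.filter (fun c => c.toNat == ch.toNat)).length :=
        List.length_pos_of_mem hmemf
      intro habs
      omega
  rw [hcong, countP_range_eq_dedup_length cs h256]
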